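-- pv_equiv track=rewrite | github.com/leiyuan1989/ipmigration | ipmigration/cell/apr/pr/pattern_apr.py | split_dict_by_increment
-- ===== SOURCE A (Python) =====
-- from collections import OrderedDict
--
-- def split_dict_by_increment(original_dict, increment=5):
--     """
--     按递增间隔拆分OrderedDict
--
--     参数:
--     original_dict - 原始OrderedDict
--     increment - 每次增加的间隔
--
--     返回:
--     拆分后的字典列表
--     """
--     result = []
--     keys = list(original_dict.keys())
--
--     # 计算最大key值
--     max_key = max(keys) if keys else 0
--
--     # 生成间隔列表
--     intervals = [i for i in range(increment, max_key + 1, increment)]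
--
--     # 如果最大值不是间隔的倍数，添加一个额外的间隔
--     if max_key % increment != 0:
--         intervals.append(max_key)
--
--     # 为每个间隔创建一个新字典
--     for interval in intervals:
--         new_dict = OrderedDict()
--         for key in keys:
--             if key <= interval:
--                 new_dict[key] = original_dict[key]
--         result.append(new_dict)
--
--     return result
-- ===== SOURCE B (Python) =====
-- from collections import OrderedDict
--
-- def _first_at_least(intervals, key):
--     # index of the first interval >= key (bisect_left), hand-written binary search
--     lo, hi = 0, len(intervals)
--     while lo < hi:
--         mid = (lo + hi) // 2
--         if intervals[mid] < key:
--             lo = mid + 1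
--         else:
--             hi = mid
--     return lo
--
-- def split_dict_by_increment(original_dict, increment=5):
--     keys = list(original_dict.keys())
--     max_key = max(keys) if keys else 0
--     intervals = list(range(increment, max_key + 1, increment))
--     if max_key % increment != 0:
--         intervals.append(max_key)
--     buckets = [[] for _ in intervals]
--     for key, value in original_dict.items():
--         j = _first_at_least(intervals, key)
--         for i in range(j, len(buckets)):
--             buckets[i].append((key, value))
--     return [OrderedDict(b) for b in buckets]
-- ===== Notes on version B (the rewrite author's own statement) =====
-- stated objective: alternative
-- what changed: Instead of rescanning every key for every interval, B binary-searches each key's first interval once and appends the pair to that bucket and all later ones in a single pass over the dict.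
import Mathlib
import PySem

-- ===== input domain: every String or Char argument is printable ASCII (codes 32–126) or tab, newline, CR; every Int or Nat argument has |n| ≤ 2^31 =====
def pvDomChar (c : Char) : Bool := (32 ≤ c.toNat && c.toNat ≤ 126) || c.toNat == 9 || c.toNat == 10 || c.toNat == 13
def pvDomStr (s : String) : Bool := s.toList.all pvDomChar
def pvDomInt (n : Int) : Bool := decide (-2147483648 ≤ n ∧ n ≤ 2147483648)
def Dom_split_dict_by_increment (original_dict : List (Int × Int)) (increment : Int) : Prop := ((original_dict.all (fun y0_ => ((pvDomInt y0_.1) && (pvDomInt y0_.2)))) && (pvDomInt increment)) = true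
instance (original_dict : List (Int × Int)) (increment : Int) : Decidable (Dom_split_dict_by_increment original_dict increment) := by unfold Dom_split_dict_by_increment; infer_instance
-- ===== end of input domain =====

-- B replaces A's rescan of every key for every interval by bucketing each key once
-- (binary search for its first interval) and appending it to all later buckets.

-- ===== PORT A =====
def split_dict_by_increment (original_dict : List (Int × Int)) (increment : Int) : List (List (Int × Int)) :=
  let d := PySem.Dict.ofList original_dict
  let keys := d.keys
  let max_key : Int :=
    match PySem.List.max? keys (fun k => k) with  -- max(keys) if keys else 0
    | some m => m
    | none => 0
  let intervals := PySem.List.pyRange increment (max_key + 1) increment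
  let intervals := if PySem.Int.mod max_key increment ≠ 0 then intervals ++ [max_key] else intervals
  intervals.foldl (fun result interval =>
    result ++ [(keys.foldl (fun nd key =>
        if key ≤ interval then nd.insert key (d.getD key 0) else nd)
        -- original_dict[key] always succeeds here (key ∈ keys), so getD's default is never used
      (PySem.Dict.empty : PySem.Dict Int Int)).items]) []

-- ===== PORT B =====
-- hand-written bisect_left while-loop of Source B (fuel = initial hi - lo bound makes it total)
def firstAtLeastLoop (intervals : List Int) (key : Int) : Nat → Nat → Nat → Nat
  | 0, lo, _ => lo
  | fuel + 1, lo, hi =>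
    if lo < hi then
      match intervals[(lo + hi) / 2]? with   -- index is always in range in Source B
      | some y =>
        if y < key then firstAtLeastLoop intervals key fuel ((lo + hi) / 2 + 1) hi
        else firstAtLeastLoop intervals key fuel lo ((lo + hi) / 2)
      | none => lo
    else lo

def firstAtLeast (intervals : List Int) (key : Int) : Nat :=
  firstAtLeastLoop intervals key intervals.length 0 intervals.length

def split_dict_by_increment_alt (original_dict : List (Int × Int)) (increment : Int) : List (List (Int × Int)) :=
  let d := PySem.Dict.ofList original_dict
  let keys := d.keys
  let max_key : Int :=
    match PySem.List.max? keys (fun k => k) with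
    | some m => m
    | none => 0
  let intervals := PySem.List.pyRange increment (max_key + 1) increment
  let intervals := if PySem.Int.mod max_key increment ≠ 0 then intervals ++ [max_key] else intervals
  let buckets := intervals.map (fun _ => ([] : List (Int × Int)))
  let buckets := d.items.foldl (fun bs kv =>
      let j := firstAtLeast intervals kv.1
      bs.mapIdx (fun i b => if j ≤ i then b ++ [kv] else b)) buckets
  buckets.map (fun b => (PySem.Dict.ofList b).items)

-- ===== PRECONDITION & SPEC =====
-- increment = 0 makes Python's range raise ValueError; only that is excluded.
def Pre_split_dict_by_increment (original_dict : List (Int × Int)) (increment : Int) : Prop :=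
  increment ≠ 0
instance (original_dict : List (Int × Int)) (increment : Int) : Decidable (Pre_split_dict_by_increment original_dict increment) := by unfold Pre_split_dict_by_increment; infer_instance

def pvWitness_split_dict_by_increment : (List (Int × Int)) × Int := ([(1, 10), (7, 20)], 3)

def Spec_split_dict_by_increment (original_dict : List (Int × Int)) (increment : Int) (out : List (List (Int × Int))) : Prop := out = split_dict_by_increment_alt original_dict increment
instance (original_dict : List (Int × Int)) (increment : Int) (out : List (List (Int × Int))) : Decidable (Spec_split_dict_by_increment original_dict increment out) := by unfold Spec_split_dict_by_increment; infer_instance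

-- ===== CLAIM (what is proved, stated in full; the proofs are below) =====
def Claim_equal_split_dict_by_increment : Prop := ∀ (original_dict : List (Int × Int)) (increment : Int), Dom_split_dict_by_increment original_dict increment → Pre_split_dict_by_increment original_dict increment → Spec_split_dict_by_increment original_dict increment (split_dict_by_increment original_dict increment)

-- ===== LEMMAS AND PROOFS =====

-- A's outer loop: fold that appends one dict per interval = map
theorem pv_foldl_append_map {α β : Type} (g : α → β) :
    ∀ (l : List α) (acc : List β),
      l.foldl (fun r x => r ++ [g x]) acc = acc ++ l.map g := by
  intro l
  induction l with
  | nil => simp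
  | cons x t ih => intro acc; simp [List.foldl_cons, ih]

-- A's inner loop: conditional fresh inserts append, so the built dict's items
-- are the filtered keys paired with their looked-up values
theorem pv_innerA (I : Int) (g : Int → Int) :
    ∀ (ks : List Int) (nd : PySem.Dict Int Int),
      ks.Nodup → (∀ k ∈ ks, nd.contains k = false) →
      (ks.foldl (fun nd k => if k ≤ I then nd.insert k (g k) else nd) nd).items
        = nd.items ++ (ks.filter (fun k => k ≤ I)).map (fun k => (k, g k)) := by
  intro ks
  induction ks with
  | nil => intro nd _ _; simp
  | cons k t ih =>
    intro nd hnd hfresh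
    have hk : nd.contains k = false := hfresh k (by simp)
    have hnd' : t.Nodup := hnd.of_cons
    have hkt : k ∉ t := by
      have := List.nodup_cons.mp hnd; exact this.1
    by_cases hle : k ≤ I
    · have hfresh' : ∀ k' ∈ t, (nd.insert k (g k)).contains k' = false := by
        intro k' hk'
        rw [PySem.Dict.contains_insert]
        have hne : k' ≠ k := fun h => hkt (h ▸ hk')
        simp [hne, hfresh k' (List.mem_cons_of_mem _ hk')]
      simp only [List.foldl_cons, if_pos hle]
      rw [ih _ hnd' hfresh', PySem.Dict.items_insert_of_not_contains _ _ hk]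
      simp [hle]
    · simp only [List.foldl_cons, if_neg hle]
      rw [ih _ hnd' (fun k' hk' => hfresh k' (List.mem_cons_of_mem _ hk'))]
      simp [hle]

theorem pv_mapIdx_id {α : Type} (l : List α) : l.mapIdx (fun _ b => b) = l := by
  apply List.ext_getElem <;> simp

theorem pv_mapIdx_congr {α β : Type} (f g : Nat → α → β) (l : List α)
    (h : ∀ (i : Nat) (hi : i < l.length), f i l[i] = g i l[i]) :
    l.mapIdx f = l.mapIdx g := by
  apply List.ext_getElem
  · simp
  · intro i hi1 hi2
    rw [List.getElem_mapIdx, List.getElem_mapIdx]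
    exact h i (by simpa using hi1)

-- B's loop: each processed pair is appended to every bucket from its index on
theorem pv_foldB (F : Int → Nat) :
    ∀ (l : List (Int × Int)) (bs : List (List (Int × Int))),
      l.foldl (fun bs kv => bs.mapIdx (fun i b => if F kv.1 ≤ i then b ++ [kv] else b)) bs
        = bs.mapIdx (fun i b => b ++ l.filter (fun kv => F kv.1 ≤ i)) := by
  intro l
  induction l with
  | nil =>
    intro bs
    simp only [List.foldl_nil, List.filter_nil, List.append_nil]
    exact (pv_mapIdx_id bs).symm
  | cons kv t ih =>
    intro bs
    simp only [List.foldl_cons]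
    rw [ih, List.mapIdx_mapIdx]
    apply pv_mapIdx_congr
    intro i hi
    by_cases h : F kv.1 ≤ i <;> simp [h]

-- rebuilding an association list with distinct keys as a dict is the identity on items
theorem pv_ofList_items (l : List (Int × Int)) (h : (l.map Prod.fst).Nodup) :
    (PySem.Dict.ofList l).items = l := by
  have := PySem.Dict.items_foldl_insert_fresh l Prod.fst Prod.snd PySem.Dict.empty
    (fun a _ => PySem.Dict.contains_empty a.1) h
  simpa [PySem.Dict.ofList, PySem.Dict.update] using this

-- the hand-written binary search is Python's bisect_left
theorem pv_firstAtLeastLoop_eq (xs : List Int) (x : Int) :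
    ∀ (fuel lo hi : Nat),
      firstAtLeastLoop xs x fuel lo hi = PySem.List.bisectLeftLoop xs x fuel lo hi := by
  intro fuel
  induction fuel with
  | zero => intro lo hi; rfl
  | succ n ih =>
    intro lo hi
    simp only [firstAtLeastLoop, PySem.List.bisectLeftLoop]
    split
    · cases hx : xs[(lo + hi) / 2]? with
      | none => rfl
      | some y => by_cases hy : y < x <;> simp [hy, ih]
    · rfl

theorem pv_firstAtLeast_eq (xs : List Int) (x : Int) :
    firstAtLeast xs x = PySem.List.bisectLeft xs x := by
  simp [firstAtLeast, PySem.List.bisectLeft, pv_firstAtLeastLoop_eq]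

-- if no element is below the key, the search returns 0
theorem pv_firstAtLeastLoop_zero (xs : List Int) (x : Int) (hall : ∀ e ∈ xs, ¬ e < x) :
    ∀ (fuel hi : Nat), hi ≤ xs.length → firstAtLeastLoop xs x fuel 0 hi = 0 := by
  intro fuel
  induction fuel with
  | zero => intro hi _; rfl
  | succ n ih =>
    intro hi hhi
    simp only [firstAtLeastLoop]
    split
    · rename_i hlt
      have hmid : (0 + hi) / 2 < xs.length := by omega
      rw [List.getElem?_eq_getElem hmid]
      have : ¬ xs[(0 + hi) / 2] < x := hall _ (List.getElem_mem hmid)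
      simp only [if_neg this]
      exact ih _ (by omega)
    · rfl

theorem pv_firstAtLeast_zero (xs : List Int) (x : Int) (hall : ∀ e ∈ xs, ¬ e < x) :
    firstAtLeast xs x = 0 :=
  pv_firstAtLeastLoop_zero xs x hall xs.length xs.length le_rfl

-- the characterisation used to compare bucket i with A's dict for interval i
theorem pv_bisect_iff (I : List Int) (hs : I.Pairwise (· ≤ ·)) (k : Int)
    (i : Nat) (hi : i < I.length) :
    (firstAtLeast I k ≤ i ↔ k ≤ I[i]) := by
  rw [pv_firstAtLeast_eq]
  obtain ⟨hlen, hlt, hge⟩ := PySem.List.bisectLeft_spec I k hs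
  constructor
  · intro h; exact hge i hi h
  · intro h
    by_contra hcon
    have : i < PySem.List.bisectLeft I k := by omega
    exact absurd h (not_le.mpr (hlt i hi this))

-- ===== VERDICT (by name: the statement is the Claim_ definition above) =====
theorem split_dict_by_increment_spec : Claim_equal_split_dict_by_increment := by
  intro od inc _hdom hpre
  unfold Spec_split_dict_by_increment
  unfold split_dict_by_increment split_dict_by_increment_alt
  simp only []
  set d := PySem.Dict.ofList od with hd
  set keys := d.keys with hkeys
  have hnd : keys.Nodup := PySem.Dict.nodup_keys_ofList od
  set M : Int := (match PySem.List.max? keys (fun k => k) with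
    | some m => m
    | none => 0) with hM
  -- every key is ≤ M
  have hkM : ∀ k ∈ keys, k ≤ M := by
    intro k hk
    cases hmax : PySem.List.max? keys (fun k => k) with
    | none =>
      exact absurd hk (by simp [(PySem.List.max?_eq_none_iff keys _).mp hmax])
    | some m =>
      have := PySem.List.max?_isMax hmax k hk
      simp only [hM, hmax]
      exact this
  set R := PySem.List.pyRange inc (M + 1) inc with hR
  set I := (if PySem.Int.mod M inc ≠ 0 then R ++ [M] else R) with hI
  -- simplify side A
  rw [pv_foldl_append_map]
  simp only [List.nil_append]
  have hitems : d.items = keys.map (fun k => (k, d.getD k 0)) :=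
    PySem.Dict.items_eq_map_keys d hnd 0
  -- side A: each dict's items are the filtered keys with their values
  have hA : ∀ ivl : Int,
      (keys.foldl (fun nd key => if key ≤ ivl then nd.insert key (d.getD key 0) else nd)
        (PySem.Dict.empty : PySem.Dict Int Int)).items
      = (keys.filter (fun k => k ≤ ivl)).map (fun k => (k, d.getD k 0)) := by
    intro ivl
    rw [pv_innerA ivl (fun k => d.getD k 0) keys PySem.Dict.empty hnd
      (fun k _ => PySem.Dict.contains_empty k)]
    rfl
  -- simplify side B
  rw [pv_foldB]
  -- key-membership iff: first bucket index vs comparison with the interval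
  have hiff : ∀ k ∈ keys, ∀ (i : Nat) (hi : i < I.length),
      (firstAtLeast I k ≤ i ↔ k ≤ I[i]) := by
    intro k hk i hi
    rcases lt_or_gt_of_ne hpre with hneg | hpos
    · -- negative step: every interval is ≥ every key, both sides always true
      have hall : ∀ e ∈ I, k ≤ e := by
        intro e he
        have hmemR : ∀ x ∈ R, k ≤ x := by
          intro x hx
          rw [hR, PySem.List.mem_pyRange_iff_of_neg hneg] at hx
          have := hkM k hk
          omega
        rw [hI] at he
        by_cases hmod : PySem.Int.mod M inc ≠ 0
        · simp only [if_pos hmod, List.mem_append, List.mem_singleton] at he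
          rcases he with h | h
          · exact hmemR _ h
          · exact h ▸ hkM k hk
        · simp only [if_neg hmod] at he
          exact hmemR _ he
      have h0 : firstAtLeast I k = 0 :=
        pv_firstAtLeast_zero I k (fun e he => not_lt.mpr (hall e he))
      simp [h0, hall _ (List.getElem_mem hi)]
    · -- positive step: intervals are sorted, use the bisect specification
      have hsortR : R.Pairwise (· ≤ ·) := by
        rw [hR, PySem.List.pyRange_of_pos _ _ hpos]
        refine List.Pairwise.map _ ?_ List.pairwise_lt_range
        intro a b hab
        have : (a : Int) < (b : Int) := by exact_mod_cast hab
        nlinarith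
      have hRle : ∀ x ∈ R, x ≤ M := by
        intro x hx
        rw [hR, PySem.List.mem_pyRange_iff_of_pos hpos] at hx
        omega
      have hsort : I.Pairwise (· ≤ ·) := by
        rw [hI]
        by_cases hmod : PySem.Int.mod M inc ≠ 0
        · simp only [if_pos hmod]
          rw [List.pairwise_append]
          exact ⟨hsortR, List.pairwise_singleton _ _, by
            intro a ha b hb; simp at hb; exact hb ▸ hRle a ha⟩
        · simpa [hmod] using hsortR
      exact pv_bisect_iff I hsort k i hi
  -- both sides are lists of length I.length; compare pointwise
  apply List.ext_getElem
  · simp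
  · intro i hi1 hi2
    have hiI : i < I.length := by simpa using hi1
    simp only [List.getElem_map, List.getElem_mapIdx, List.nil_append]
    rw [hA]
    rw [hitems, List.filter_map]
    have hfeq : keys.filter ((fun kv : Int × Int => decide (firstAtLeast I kv.1 ≤ i)) ∘
          (fun k => (k, d.getD k 0)))
        = keys.filter (fun k => k ≤ I[i]) := by
      apply List.filter_congr
      intro k hk
      simp only [Function.comp]
      by_cases h : k ≤ I[i]
      · simp [h, (hiff k hk i hiI).mpr h]
      · have hn : ¬ firstAtLeast I k ≤ i := fun hc => h ((hiff k hk i hiI).mp hc)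
        simp [h, hn]
    rw [hfeq]
    rw [pv_ofList_items]
    have : ((keys.filter (fun k => k ≤ I[i])).map (fun k => (k, d.getD k 0))).map Prod.fst
        = keys.filter (fun k => k ≤ I[i]) := by
      simp [List.map_map, Function.comp_def]
    rw [this]
    exact hnd.sublist List.filter_sublist
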